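-- pv_equiv track=rewrite | github.com/Owenbeaver/influx-dashboard2 | pipeline.py | _best_phone
-- ===== SOURCE A (Python) =====
-- def _best_phone(phone_list: list) -> str:
--     """Pick the best sanitized phone number from Apollo's phone_numbers array."""
--     if not phone_list:
--         return ""
--     mobile = next((p for p in phone_list
--                    if p.get("type_cd") == "mobile" and p.get("status_cd") == "valid_number"), None)
--     valid  = next((p for p in phone_list if p.get("status_cd") == "valid_number"), None)
--     best   = mobile or valid or phone_list[0]
--     return best.get("sanitized_number", "")
-- ===== SOURCE B (Python) =====
-- def _best_phone(phone_list: list) -> str: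
--     """Score each entry, then pick the first entry with the best (lowest) score."""
--     if not phone_list:
--         return ""
--
--     def rank(p):
--         if p.get("status_cd") != "valid_number":
--             return 2
--         return 0 if p.get("type_cd") == "mobile" else 1
--
--     best = min(phone_list, key=rank)
--     return best.get("sanitized_number", "")
-- ===== Notes on version B (the rewrite author's own statement) =====
-- stated objective: alternative
-- what changed: Replaces A's cascade of two priority-specific scans plus an or-chain by a scoring scheme: each entry gets a numeric rank (0 valid mobile, 1 valid, 2 other) and the answer is the first entry of minimal rank via a single stable min(key=rank).
import Mathlib
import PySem

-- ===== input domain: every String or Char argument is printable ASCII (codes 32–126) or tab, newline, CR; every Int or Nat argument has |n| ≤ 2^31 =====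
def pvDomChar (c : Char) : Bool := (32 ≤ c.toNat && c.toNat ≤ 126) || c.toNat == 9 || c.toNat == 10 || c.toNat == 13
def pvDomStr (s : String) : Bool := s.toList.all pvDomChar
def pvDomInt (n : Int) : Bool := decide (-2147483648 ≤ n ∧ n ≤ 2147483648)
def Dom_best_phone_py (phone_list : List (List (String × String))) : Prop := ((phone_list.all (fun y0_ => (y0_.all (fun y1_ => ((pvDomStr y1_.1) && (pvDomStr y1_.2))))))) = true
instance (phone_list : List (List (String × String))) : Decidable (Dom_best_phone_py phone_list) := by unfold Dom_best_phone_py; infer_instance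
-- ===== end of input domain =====

-- B replaces A's cascade of two priority-specific scans by a numeric scoring of every entry
-- (0 = valid mobile, 1 = valid, 2 = other) and a single stable min-by-rank; same return value.

-- dict.get(k) on an association list: value of the first matching key (exact for Python dicts, which have unique keys)
def pget (d : List (String × String)) (k : String) : Option String :=
  (d.find? (fun kv => kv.1 == k)).map (·.2)

-- Python `x or y` for an optional dict x (None and {} are falsy) against a dict y
def pyOrD (x : Option (List (String × String))) (y : List (String × String)) : List (String × String) :=
  match x with
  | some v => if v.isEmpty then y else v
  | none => y

-- ===== PORT A =====
def best_phone_py (phone_list : List (List (String × String))) : String :=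
  match phone_list with
  | [] => ""
  | p0 :: _ =>
    let mobile := phone_list.find? (fun p =>
      pget p "type_cd" == some "mobile" && pget p "status_cd" == some "valid_number")
    let valid := phone_list.find? (fun p => pget p "status_cd" == some "valid_number")
    let best :=
      match mobile with
      | some m => if m.isEmpty then pyOrD valid p0 else m
      | none => pyOrD valid p0
    (pget best "sanitized_number").getD ""

-- ===== PORT B =====
-- B's rank function: 2 for a non-valid entry, 0 for a valid mobile, 1 for any other valid entry
def bRank (p : List (String × String)) : Nat :=
  if pget p "status_cd" != some "valid_number" then 2
  else if pget p "type_cd" == some "mobile" then 0 else 1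

def best_phone_py_alt (phone_list : List (List (String × String))) : String :=
  match phone_list with
  | [] => ""
  | _ :: _ =>
    match PySem.List.min? phone_list bRank with
    | some best => (pget best "sanitized_number").getD ""
    | none => ""   -- unreachable: min? of a nonempty list is some

-- ===== PRECONDITION & SPEC =====
def Spec_best_phone_py (phone_list : List (List (String × String))) (out : String) : Prop := out = best_phone_py_alt phone_list
instance (phone_list : List (List (String × String))) (out : String) : Decidable (Spec_best_phone_py phone_list out) := by unfold Spec_best_phone_py; infer_instance

-- ===== CLAIM (what is proved, stated in full; the proofs are below) =====
def Claim_equal_best_phone_py : Prop := ∀ (phone_list : List (List (String × String))), Dom_best_phone_py phone_list → Spec_best_phone_py phone_list (best_phone_py phone_list)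

-- ===== LEMMAS AND PROOFS =====

-- A's two scan predicates, abbreviated for the lemmas
def pMob (p : List (String × String)) : Bool :=
  pget p "type_cd" == some "mobile" && pget p "status_cd" == some "valid_number"
def pVal (p : List (String × String)) : Bool :=
  pget p "status_cd" == some "valid_number"

lemma bRank_eq_zero_iff (p : List (String × String)) : bRank p = 0 ↔ pMob p = true := by
  unfold bRank pMob
  by_cases hs : pget p "status_cd" = some "valid_number" <;>
    by_cases ht : pget p "type_cd" = some "mobile" <;>
      simp [bne, hs, ht]

lemma bRank_le_one_iff (p : List (String × String)) : bRank p ≤ 1 ↔ pVal p = true := by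
  unfold bRank pVal
  by_cases hs : pget p "status_cd" = some "valid_number" <;>
    by_cases ht : pget p "type_cd" = some "mobile" <;>
      simp [bne, hs, ht]

lemma bRank_le_two (p : List (String × String)) : bRank p ≤ 2 := by
  unfold bRank; split_ifs <;> omega

lemma pMob_of_rank {p : List (String × String)} (h : ¬ bRank p = 0) : pMob p = false := by
  cases hm : pMob p with
  | false => rfl
  | true => exact absurd ((bRank_eq_zero_iff p).mpr hm) h

lemma pVal_of_rank {p : List (String × String)} (h : bRank p = 2) : pVal p = false := by
  cases hv : pVal p with
  | false => rfl
  | true => have := (bRank_le_one_iff p).mpr hv; omega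

-- the inner fold of PySem.List.min? once the accumulator is a concrete element
def minFold (b : List (String × String)) (l : List (List (String × String))) :
    List (String × String) :=
  l.foldl (fun m x => if bRank x < bRank m then x else m) b

lemma minFold_cons (b p : List (String × String)) (r : List (List (String × String))) :
    minFold b (p :: r) = minFold (if bRank p < bRank b then p else b) r := rfl

lemma min?_cons (p0 : List (String × String)) (rest : List (List (String × String))) :
    PySem.List.min? (p0 :: rest) bRank = some (minFold p0 rest) := by
  show List.foldl _ (some p0) rest = _
  unfold minFold
  induction rest generalizing p0 with
  | nil => rfl
  | cons p r ih =>
    simp only [List.foldl_cons]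
    by_cases h : bRank p < bRank p0 <;> simp [h, ih]

lemma minFold_rank_zero (b : List (String × String)) (l : List (List (String × String)))
    (hb : bRank b = 0) : minFold b l = b := by
  induction l with
  | nil => rfl
  | cons p r ih =>
    rw [minFold_cons, if_neg (by omega)]
    exact ih

lemma minFold_rank_one (b : List (String × String)) (l : List (List (String × String)))
    (hb : bRank b = 1) :
    minFold b l = match l.find? pMob with
                  | some m => m
                  | none => b := by
  induction l with
  | nil => rfl
  | cons p r ih =>
    by_cases h0 : bRank p = 0
    · rw [minFold_cons, if_pos (by omega), minFold_rank_zero p r h0,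
        List.find?_cons_of_pos ((bRank_eq_zero_iff p).mp h0)]
    · rw [minFold_cons, if_neg (by omega), List.find?_cons_of_neg (by simp [pMob_of_rank h0])]
      exact ih

lemma minFold_rank_two (b : List (String × String)) (l : List (List (String × String)))
    (hb : bRank b = 2) :
    minFold b l = match l.find? pMob with
                  | some m => m
                  | none => match l.find? pVal with
                            | some v => v
                            | none => b := by
  induction l with
  | nil => rfl
  | cons p r ih =>
    by_cases h0 : bRank p = 0
    · rw [minFold_cons, if_pos (by omega), minFold_rank_zero p r h0,
        List.find?_cons_of_pos ((bRank_eq_zero_iff p).mp h0)]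
    · by_cases h1 : bRank p = 1
      · have hv : pVal p = true := (bRank_le_one_iff p).mp (by omega)
        rw [minFold_cons, if_pos (by omega), minFold_rank_one p r h1,
          List.find?_cons_of_neg (by simp [pMob_of_rank h0]),
          List.find?_cons_of_pos hv]
      · have h2 : bRank p = 2 := by have := bRank_le_two p; omega
        rw [minFold_cons, if_neg (by omega),
          List.find?_cons_of_neg (by simp [pMob_of_rank h0]),
          List.find?_cons_of_neg (by simp [pVal_of_rank h2])]
        exact ih

-- an entry on which a lookup succeeds is a nonempty dict
lemma pget_ne_nil {m : List (String × String)} {k v : String} (h : (pget m k == some v) = true) :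
    m.isEmpty = false := by
  cases m with
  | nil => simp [pget] at h
  | cons a l => simp

lemma pMob_ne_nil {m : List (String × String)} (h : pMob m = true) : m.isEmpty = false :=
  pget_ne_nil (Bool.and_elim_right h)

lemma pVal_ne_nil {m : List (String × String)} (h : pVal m = true) : m.isEmpty = false :=
  pget_ne_nil h

-- A's body, rewritten through the pMob/pVal abbreviations with the falsy-dict checks discharged
lemma best_phone_py_cons (p0 : List (String × String)) (rest : List (List (String × String))) :
    best_phone_py (p0 :: rest) =
      match (p0 :: rest).find? pMob with
      | some m => (pget m "sanitized_number").getD ""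
      | none => match (p0 :: rest).find? pVal with
                | some v => (pget v "sanitized_number").getD ""
                | none => (pget p0 "sanitized_number").getD "" := by
  show (pget (match (p0 :: rest).find? pMob with
              | some m => if m.isEmpty then pyOrD ((p0 :: rest).find? pVal) p0 else m
              | none => pyOrD ((p0 :: rest).find? pVal) p0) "sanitized_number").getD "" = _
  cases hfm : (p0 :: rest).find? pMob with
  | some m => simp [pMob_ne_nil (List.find?_some hfm)]
  | none =>
    cases hfv : (p0 :: rest).find? pVal with
    | some v => simp [pyOrD, pVal_ne_nil (List.find?_some hfv)]
    | none => simp [pyOrD]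

-- ===== VERDICT (by name: the statement is the Claim_ definition above) =====
theorem best_phone_py_spec : Claim_equal_best_phone_py := by
  intro phone_list _
  show best_phone_py phone_list = best_phone_py_alt phone_list
  cases phone_list with
  | nil => rfl
  | cons p0 rest =>
    have hB : best_phone_py_alt (p0 :: rest) =
        (pget (minFold p0 rest) "sanitized_number").getD "" := by
      show (match PySem.List.min? (p0 :: rest) bRank with
            | some best => (pget best "sanitized_number").getD ""
            | none => "") = _
      rw [min?_cons]
    rw [best_phone_py_cons, hB]
    by_cases h0 : bRank p0 = 0
    · rw [minFold_rank_zero p0 rest h0,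
        List.find?_cons_of_pos ((bRank_eq_zero_iff p0).mp h0)]
    · have hm : pMob p0 = false := pMob_of_rank h0
      by_cases h1 : bRank p0 = 1
      · have hv : pVal p0 = true := (bRank_le_one_iff p0).mp (by omega)
        rw [minFold_rank_one p0 rest h1, List.find?_cons_of_neg (by simp [hm]),
          List.find?_cons_of_pos hv]
        cases rest.find? pMob <;> rfl
      · have h2 : bRank p0 = 2 := by have := bRank_le_two p0; omega
        rw [minFold_rank_two p0 rest h2, List.find?_cons_of_neg (by simp [hm]),
          List.find?_cons_of_neg (by simp [pVal_of_rank h2])]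
        cases rest.find? pMob with
        | some m => rfl
        | none => cases rest.find? pVal <;> rfl
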